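-- pv_equiv track=rewrite | github.com/Dev-Laurin/adventOfCode2023 | day1/day1.py | calibrateLine
-- ===== SOURCE A (Python) =====
-- def calibrateLine(line):
--     nums_as_strings = {"one": "1", "two": "2", "three": "3",
--                        "four": "4", "five": "5", "six": "6",
--                        "seven": "7", "eight": "8", "nine": "9"}
--     firstNum = ""
--     lastNum = ""
--     firstNumIndex = len(line) - 1
--     lastNumIndex = 0
--     currentIndex = 0
--
--     for char in line:
--         try:
--             integer = int(char)
--             if integer and firstNum == "":
--                 firstNum = char
--                 firstNumIndex = currentIndex
--             if integer and firstNum != "":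
--                 lastNum = char
--                 lastNumIndex = currentIndex
--             currentIndex += 1
--         except:
--             currentIndex += 1
--
--     #is lettered word before or after?
--     for number_string in nums_as_strings:
--         try:
--             index = line.index(number_string)
--             #First occurrence
--             if index >= 0:
--                 if index <= firstNumIndex:
--                     firstNum = nums_as_strings[number_string]
--                     firstNumIndex = index
--
--             #Last occurrence
--             index = line.rfind(number_string)
--             if index >= 0:
--                 if index >= lastNumIndex:
--                     lastNum = nums_as_strings[number_string]
--                     lastNumIndex = index
--
--         except:
--             continue
--
--     num_str = ""
--     if lastNum == "" and firstNum != "":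
--         num_str = firstNum + firstNum
--     elif lastNum != "" and firstNum != "":
--         num_str = firstNum + lastNum
--     else:
--         #No number, skip line
--         num_str = "0"
--
--     return int(num_str)
-- ===== SOURCE B (Python) =====
-- def calibrateLine(line):
--     # One left-to-right pass collecting every digit-or-word candidate in order,
--     # then the answer is first+last candidate (simpler than per-word index scans).
--     words = {"one": "1", "two": "2", "three": "3",
--              "four": "4", "five": "5", "six": "6",
--              "seven": "7", "eight": "8", "nine": "9"}
--     cands = []
--     for i, ch in enumerate(line):
--         if ch in "123456789":
--             cands.append(ch)
--         else:
--             for w, v in words.items():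
--                 if line.startswith(w, i):
--                     cands.append(v)
--                     break
--     if not cands:
--         return 0
--     return int(cands[0] + cands[-1])
-- ===== Notes on version B (the rewrite author's own statement) =====
-- stated objective: simpler
-- what changed: A's two-phase scheme (a digit scan tracking first/last indices, then nine separate index/rfind scans over the whole line with threshold comparisons) is replaced by one left-to-right pass that collects every digit-or-word candidate in order and returns int(first+last).
import Mathlib
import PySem

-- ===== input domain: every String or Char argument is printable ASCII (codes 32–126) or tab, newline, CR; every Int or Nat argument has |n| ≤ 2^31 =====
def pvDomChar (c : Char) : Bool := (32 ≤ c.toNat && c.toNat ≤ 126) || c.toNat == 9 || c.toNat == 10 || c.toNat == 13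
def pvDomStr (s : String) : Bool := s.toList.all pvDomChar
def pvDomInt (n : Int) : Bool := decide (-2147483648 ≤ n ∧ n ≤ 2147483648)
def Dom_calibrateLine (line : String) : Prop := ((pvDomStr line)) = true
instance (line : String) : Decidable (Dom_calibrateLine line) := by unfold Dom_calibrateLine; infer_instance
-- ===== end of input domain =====

-- B replaces A's two-phase scheme (digit scan with index thresholds + per-word index/rfind scans)
-- by ONE left-to-right pass collecting every digit-or-word candidate in order; answer = first/last candidate.
-- Objective: simpler. Python strings of length ≤ 1 are carried as List Char / Char in both ports.

-- ===== PORT A =====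
-- the dict nums_as_strings; keys as char lists, the single-char string values as Char
def numsAsStrings : List (List Char × Char) :=
  [(['o','n','e'], '1'), (['t','w','o'], '2'), (['t','h','r','e','e'], '3'),
   (['f','o','u','r'], '4'), (['f','i','v','e'], '5'), (['s','i','x'], '6'),
   (['s','e','v','e','n'], '7'), (['e','i','g','h','t'], '8'), (['n','i','n','e'], '9')]

def calibrateLine (line : String) : Int :=
  let l := line.toList
  -- first for-loop: state (firstNum, lastNum, firstNumIndex, lastNumIndex, currentIndex); "" carried as []
  let s1 := l.foldl (fun (st : List Char × List Char × Int × Int × Int) c =>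
    match st with
    | (firstNum, lastNum, fIdx, lIdx, cur) =>
      match PySem.Int.ofChars? [c] with          -- integer = int(char); none = ValueError → except branch
      | some integer =>
          let p1 := if integer ≠ 0 ∧ firstNum = ([] : List Char) then ([c], cur) else (firstNum, fIdx)
          let p2 := if integer ≠ 0 ∧ p1.1 ≠ ([] : List Char) then ([c], cur) else (lastNum, lIdx)
          (p1.1, p2.1, p1.2, p2.2, cur + 1)
      | none => (firstNum, lastNum, fIdx, lIdx, cur + 1))
    (([] : List Char), ([] : List Char), (l.length : Int) - 1, (0 : Int), (0 : Int))
  match s1 with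
  | (firstNum1, lastNum1, fIdx1, lIdx1, _) =>
    -- second for-loop over the dict keys
    let s2 := numsAsStrings.foldl (fun (st : List Char × List Char × Int × Int) ns =>
      match st with
      | (firstNum, lastNum, fIdx, lIdx) =>
        let idx := PySem.Chars.find l ns.1       -- line.index(ns): raises ValueError iff find = -1 → except: continue
        if idx = -1 then (firstNum, lastNum, fIdx, lIdx)
        else
          let p1 := if 0 ≤ idx ∧ idx ≤ fIdx then (([ns.2] : List Char), idx) else (firstNum, fIdx)
          let ridx := PySem.Chars.rfind l ns.1   -- line.rfind(ns)
          let p2 := if 0 ≤ ridx ∧ lIdx ≤ ridx then (([ns.2] : List Char), ridx) else (lastNum, lIdx)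
          (p1.1, p2.1, p1.2, p2.2))
      (firstNum1, lastNum1, fIdx1, lIdx1)
    match s2 with
    | (firstNum, lastNum, _, _) =>
      let numStr := if lastNum = ([] : List Char) ∧ firstNum ≠ ([] : List Char) then firstNum ++ firstNum
        else if lastNum ≠ ([] : List Char) ∧ firstNum ≠ ([] : List Char) then firstNum ++ lastNum
        else ['0']
      (PySem.Int.ofChars? numStr).getD 0         -- int(num_str); never a ValueError on the strings built above

-- ===== PORT B =====
def calibrateLine_alt (line : String) : Int :=
  let l := line.toList
  -- one pass: for i, ch in enumerate(line): append the digit-or-word candidate at i (if any)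
  let cands := (PySem.List.enumerate l).foldl (fun (acc : List Char) p =>
      if p.2 ∈ ['1','2','3','4','5','6','7','8','9'] then acc ++ [p.2]
      else
        -- for w, v in words.items(): if line.startswith(w, i): append(v); break
        -- startswith(w, i) with i ≥ 0 is exactly: w is a prefix of the drop at i
        match numsAsStrings.find? (fun w => w.1.isPrefixOf (l.drop p.1.toNat)) with
        | some w => acc ++ [w.2]
        | none => acc) []
  match cands with
  | [] => 0
  | c :: rest => (PySem.Int.ofChars? [c, (c :: rest).getLast (by simp)]).getD 0  -- int(cands[0] + cands[-1])

-- ===== PRECONDITION & SPEC =====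
def Spec_calibrateLine (line : String) (out : Int) : Prop := out = calibrateLine_alt line
instance (line : String) (out : Int) : Decidable (Spec_calibrateLine line out) := by unfold Spec_calibrateLine; infer_instance

-- ===== CLAIM (what is proved, stated in full; the proofs are below) =====
def Claim_equal_calibrateLine : Prop := ∀ (line : String), Dom_calibrateLine line → Spec_calibrateLine line (calibrateLine line)


-- ===== LEMMAS AND PROOFS =====

/-- nonzero-ASCII-digit test used throughout the proofs -/
def isDigit19 (c : Char) : Bool := 49 ≤ c.toNat && c.toNat ≤ 57

theorem dom_char_lt (c : Char) (h : pvDomChar c = true) : c.toNat < 127 := by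
  unfold pvDomChar at h
  simp only [Bool.or_eq_true, Bool.and_eq_true, decide_eq_true_eq, beq_iff_eq] at h
  omega

set_option maxRecDepth 100000 in
theorem ofChars_single_key : ∀ n < 127, PySem.Int.ofChars? [Char.ofNat n] =
    (if isDigit19 (Char.ofNat n) then some (((Char.ofNat n).toNat : Int) - 48)
     else if (Char.ofNat n).toNat = 48 then some 0 else none) := by decide

theorem ofChars_single (c : Char) (h : pvDomChar c = true) :
    PySem.Int.ofChars? [c] =
      (if isDigit19 c then some ((c.toNat : Int) - 48)
       else if c.toNat = 48 then some 0 else none) := by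
  have := ofChars_single_key c.toNat (dom_char_lt c h)
  rwa [Char.ofNat_toNat] at this

set_option maxRecDepth 20000 in
theorem mem_digits_key : ∀ n < 127,
    ((Char.ofNat n ∈ ['1','2','3','4','5','6','7','8','9']) ↔ isDigit19 (Char.ofNat n) = true) := by decide

theorem mem_digits_iff (c : Char) (h : pvDomChar c = true) :
    (c ∈ ['1','2','3','4','5','6','7','8','9']) ↔ isDigit19 c = true := by
  have := mem_digits_key c.toNat (dom_char_lt c h)
  rwa [Char.ofNat_toNat] at this

-- facts about the concrete word table
theorem words_ne_nil : ∀ w ∈ numsAsStrings, w.1 ≠ [] := by decide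

theorem words_len3 : ∀ w ∈ numsAsStrings, 3 ≤ w.1.length := by decide

theorem words_head_not_digit : ∀ w ∈ numsAsStrings, isDigit19 (w.1.headD ' ') = false := by decide

theorem words_prefix_antisymm : ∀ u ∈ numsAsStrings, ∀ w ∈ numsAsStrings, (u.1 <+: w.1 ∨ w.1 <+: u.1) → u = w := by decide

/-- the word candidate (via B's find?) at position i -/
def wordAt (l : List Char) (i : Nat) : Option Char :=
  (numsAsStrings.find? (fun w => w.1.isPrefixOf (l.drop i))).map (fun w => w.2)

theorem wordAt_of_prefix {l : List Char} {i : Nat} {w : List Char × Char}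
    (hw : w ∈ numsAsStrings) (hp : w.1 <+: l.drop i) : wordAt l i = some w.2 := by
  unfold wordAt
  cases hfind : numsAsStrings.find? (fun w => w.1.isPrefixOf (l.drop i)) with
  | none =>
      exfalso
      have := List.find?_eq_none.mp hfind w hw
      simp [List.isPrefixOf_iff_prefix] at this
      exact this hp
  | some u =>
      have hu : u ∈ numsAsStrings := List.mem_of_find?_eq_some hfind
      have hup : u.1 <+: l.drop i := by
        have := List.find?_some hfind
        simpa [List.isPrefixOf_iff_prefix] using this
      have : u = w := words_prefix_antisymm u hu w hw (List.prefix_or_prefix_of_prefix hup hp)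
      simp [this]

theorem wordAt_eq_some {l : List Char} {i : Nat} {v : Char} (h : wordAt l i = some v) :
    ∃ w ∈ numsAsStrings, w.2 = v ∧ w.1 <+: l.drop i := by
  unfold wordAt at h
  cases hfind : numsAsStrings.find? (fun w => w.1.isPrefixOf (l.drop i)) with
  | none => simp [hfind] at h
  | some u =>
      refine ⟨u, List.mem_of_find?_eq_some hfind, ?_, ?_⟩
      · simp [hfind] at h; exact h
      · have := List.find?_some hfind
        simpa [List.isPrefixOf_iff_prefix] using this

/-- the candidate (digit or word) at position i -/
def candAt (l : List Char) (i : Nat) : Option Char :=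
  match l[i]? with
  | none => none
  | some c => if isDigit19 c then some c else wordAt l i

theorem candAt_of_getElem {l : List Char} {i : Nat} {c : Char} (hget : l[i]? = some c) :
    candAt l i = if isDigit19 c then some c else wordAt l i := by
  unfold candAt; rw [hget]

def candPairs (l : List Char) : List (Nat × Char) :=
  (List.range l.length).filterMap (fun i => (candAt l i).map (fun v => (i, v)))

theorem mem_candPairs {l : List Char} {i : Nat} {v : Char} :
    (i, v) ∈ candPairs l ↔ candAt l i = some v := by
  unfold candPairs
  simp only [List.mem_filterMap, List.mem_range, Option.map_eq_some_iff]
  constructor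
  · rintro ⟨j, _, u, hj, huv⟩
    obtain ⟨rfl, rfl⟩ := Prod.mk.injEq .. ▸ huv
    simpa using hj
  · intro h
    have hlt : i < l.length := by
      unfold candAt at h
      cases hg : l[i]? with
      | none => rw [hg] at h; simp at h
      | some c => exact (List.getElem?_eq_some_iff.mp hg).1
    exact ⟨i, hlt, v, h, rfl⟩

theorem candPairs_sorted (l : List Char) : (candPairs l).Pairwise (fun p q => p.1 < q.1) := by
  unfold candPairs
  rw [List.pairwise_filterMap]
  refine List.Pairwise.imp_of_mem ?_ (List.pairwise_lt_range)
  intro a b _ _ hab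
  intro x hx y hy
  simp only [Option.map_eq_some_iff] at hx hy
  obtain ⟨xa, -, hx2⟩ := hx; obtain ⟨ya, -, hy2⟩ := hy
  rw [← hx2, ← hy2]
  exact hab


-- min/max via sortedness
theorem sorted_head_min {a : Nat × Char} {rest : List (Nat × Char)}
    (h : (a :: rest).Pairwise (fun p q => p.1 < q.1)) :
    ∀ q ∈ a :: rest, a.1 ≤ q.1 := by
  intro q hq
  rcases List.mem_cons.mp hq with rfl | hq
  · exact le_refl _
  · exact le_of_lt ((List.pairwise_cons.mp h).1 q hq)

theorem sorted_getLast_max : ∀ {l : List (Nat × Char)},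
    l.Pairwise (fun p q => p.1 < q.1) → ∀ (hne : l ≠ []), ∀ q ∈ l, q.1 ≤ (l.getLast hne).1 := by
  intro l
  induction l with
  | nil => intro _ hne; simp at hne
  | cons a rest ih =>
      intro h hne q hq
      cases rest with
      | nil => simp at hq; subst hq; simp [List.getLast]
      | cons b t =>
          rw [List.getLast_cons (by simp)]
          have hmax := List.getLast_mem (l := b :: t) (by simp)
          rcases List.mem_cons.mp hq with rfl | hq2
          · exact le_of_lt ((List.pairwise_cons.mp h).1 _ hmax)
          · exact ih (List.pairwise_cons.mp h).2 (by simp) q hq2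

-- rfind: go checks positions j, j-1, …, 0
theorem rfind_go_spec (s sub : List Char) : ∀ j : Nat,
    (PySem.Chars.rfind.go s sub j = -1 ∧ ∀ i ≤ j, ¬ sub <+: s.drop i) ∨
    (∃ m : Nat, m ≤ j ∧ PySem.Chars.rfind.go s sub j = (m : Int) ∧ sub <+: s.drop m ∧
      ∀ i ≤ j, sub <+: s.drop i → i ≤ m) := by
  intro j
  induction j with
  | zero =>
      by_cases hp : sub <+: s.drop 0
      · right
        have hps : sub <+: s := by simpa using hp
        exact ⟨0, le_refl _, by simp [PySem.Chars.rfind.go, List.isPrefixOf_iff_prefix, hps],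
          hp, fun i hi _ => hi⟩
      · left
        have hps : ¬ sub <+: s := fun h => hp (by simpa using h)
        refine ⟨by simp [PySem.Chars.rfind.go, List.isPrefixOf_iff_prefix, hps], ?_⟩
        intro i hi
        interval_cases i
        exact hp
  | succ j ih =>
      by_cases hp : sub <+: s.drop (j + 1)
      · right
        refine ⟨j + 1, le_refl _, ?_, hp, fun i hi _ => hi⟩
        simp [PySem.Chars.rfind.go, List.isPrefixOf_iff_prefix, hp]
      · have hgo : PySem.Chars.rfind.go s sub (j + 1) = PySem.Chars.rfind.go s sub j := by
          simp [PySem.Chars.rfind.go, List.isPrefixOf_iff_prefix, hp]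
        rcases ih with ⟨h1, h2⟩ | ⟨m, hm, hgo2, hpm, hmax⟩
        · left
          refine ⟨by rw [hgo]; exact h1, ?_⟩
          intro i hi
          rcases Nat.lt_succ_iff_lt_or_eq.mp (Nat.lt_succ_of_le hi) with hlt | rfl
          · exact h2 i (by omega)
          · exact hp
        · right
          refine ⟨m, le_trans hm (Nat.le_succ _), by rw [hgo]; exact hgo2, hpm, ?_⟩
          intro i hi hpi
          rcases Nat.le_succ_iff_eq_or_le.mp hi with rfl | hle
          · exact absurd hpi hp
          · exact hmax i hle hpi

theorem rfind_found {s sub : List Char} {i : Nat} (hsub : sub ≠ []) (hp : sub <+: s.drop i) :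
    ∃ m : Nat, PySem.Chars.rfind s sub = (m : Int) ∧ sub <+: s.drop m ∧
      ∀ i' : Nat, sub <+: s.drop i' → i' ≤ m := by
  have hi_le : i ≤ s.length := by
    by_contra hgt
    rw [List.drop_eq_nil_of_le (le_of_lt (Nat.lt_of_not_le hgt))] at hp
    exact hsub (List.prefix_nil.mp hp)
  rcases rfind_go_spec s sub s.length with ⟨_, h2⟩ | ⟨m, hm, hgo, hpm, hmax⟩
  · exact absurd hp (h2 i hi_le)
  · refine ⟨m, hgo, hpm, ?_⟩
    intro i' hpi'
    have : i' ≤ s.length := by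
      by_contra hgt
      rw [List.drop_eq_nil_of_le (le_of_lt (Nat.lt_of_not_le hgt))] at hpi'
      exact hsub (List.prefix_nil.mp hpi')
    exact hmax i' this hpi'

theorem find_found {s sub : List Char} (h : PySem.Chars.find s sub ≠ -1) :
    0 ≤ PySem.Chars.find s sub ∧ sub <+: s.drop (PySem.Chars.find s sub).toNat ∧
      ∀ i : Nat, sub <+: s.drop i → (PySem.Chars.find s sub).toNat ≤ i := by
  have h0 : 0 ≤ PySem.Chars.find s sub := by
    have := PySem.Chars.neg_one_le_find (s := s) (sub := sub)
    omega
  obtain ⟨hp, hmin⟩ := PySem.Chars.find_spec h0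
  refine ⟨h0, hp, ?_⟩
  intro i hpi
  by_contra hgt
  exact hmin i (Nat.lt_of_not_le hgt) hpi

theorem find_ne_of_prefix {s sub : List Char} {i : Nat} (hp : sub <+: s.drop i) :
    PySem.Chars.find s sub ≠ -1 := by
  have hinf : sub <:+: s := hp.isInfix.trans (List.drop_suffix i s).isInfix
  have := PySem.Chars.find_nonneg_iff (s := s) (sub := sub) |>.mpr hinf
  omega

-- digit pairs collected by the first loop
def dpairs : List Char → Nat → List (Nat × Char)
  | [], _ => []
  | c :: t, k => if isDigit19 c then (k, c) :: dpairs t (k + 1) else dpairs t (k + 1)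

theorem dpairs_ge : ∀ (t : List Char) (k : Nat), ∀ p ∈ dpairs t k, k ≤ p.1 := by
  intro t
  induction t with
  | nil => intro k p hp; simp [dpairs] at hp
  | cons c t ih =>
      intro k p hp
      unfold dpairs at hp
      split at hp
      · rcases List.mem_cons.mp hp with rfl | hp2
        · exact le_refl _
        · exact le_trans (Nat.le_succ _) (ih (k + 1) p hp2)
      · exact le_trans (Nat.le_succ _) (ih (k + 1) p hp)

theorem dpairs_sorted : ∀ (t : List Char) (k : Nat), (dpairs t k).Pairwise (fun p q => p.1 < q.1) := by
  intro t
  induction t with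
  | nil => intro k; simp [dpairs]
  | cons c t ih =>
      intro k
      unfold dpairs
      split
      · refine List.pairwise_cons.mpr ⟨?_, ih (k + 1)⟩
        intro q hq
        exact Nat.lt_of_lt_of_le (Nat.lt_succ_self k) (dpairs_ge t (k + 1) q hq)
      · exact ih (k + 1)

theorem mem_dpairs : ∀ (t : List Char) (k i : Nat) (c : Char),
    ((i, c) ∈ dpairs t k ↔ k ≤ i ∧ t[i - k]? = some c ∧ isDigit19 c = true) := by
  intro t
  induction t with
  | nil => intro k i c; simp [dpairs]
  | cons d t ih =>
      intro k i c
      constructor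
      · intro hp
        unfold dpairs at hp
        split at hp
        · rcases List.mem_cons.mp hp with heq | hp2
          · obtain ⟨rfl, rfl⟩ := Prod.mk.injEq .. ▸ heq
            simp only [Nat.sub_self]
            refine ⟨le_refl _, by simp, by assumption⟩
          · obtain ⟨h1, h2, h3⟩ := (ih (k + 1) i c).mp hp2
            refine ⟨by omega, ?_, h3⟩
            have : i - k = (i - (k + 1)) + 1 := by omega
            rw [this]
            simpa using h2
        · obtain ⟨h1, h2, h3⟩ := (ih (k + 1) i c).mp hp
          refine ⟨by omega, ?_, h3⟩
          have : i - k = (i - (k + 1)) + 1 := by omega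
          rw [this]
          simpa using h2
      · rintro ⟨h1, h2, h3⟩
        unfold dpairs
        by_cases hik : i = k
        · subst hik
          simp only [Nat.sub_self] at h2
          simp only [List.getElem?_cons_zero, Option.some.injEq] at h2
          subst h2
          simp [h3]
        · have hgt : k + 1 ≤ i := by omega
          have h2' : t[i - (k + 1)]? = some c := by
            have : i - k = (i - (k + 1)) + 1 := by omega
            rw [this] at h2
            simpa using h2
          have hmem := (ih (k + 1) i c).mpr ⟨hgt, h2', h3⟩
          split
          · exact List.mem_cons_of_mem _ hmem
          · exact hmem

-- named forms of A's loop bodies (definitionally equal to the lambdas in the port)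
def stepA (st : List Char × List Char × Int × Int × Int) (c : Char) :
    List Char × List Char × Int × Int × Int :=
  match st with
  | (firstNum, lastNum, fIdx, lIdx, cur) =>
    match PySem.Int.ofChars? [c] with
    | some integer =>
        let p1 := if integer ≠ 0 ∧ firstNum = ([] : List Char) then ([c], cur) else (firstNum, fIdx)
        let p2 := if integer ≠ 0 ∧ p1.1 ≠ ([] : List Char) then ([c], cur) else (lastNum, lIdx)
        (p1.1, p2.1, p1.2, p2.2, cur + 1)
    | none => (firstNum, lastNum, fIdx, lIdx, cur + 1)

def stepW (l : List Char) (st : List Char × List Char × Int × Int) (ns : List Char × Char) :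
    List Char × List Char × Int × Int :=
  match st with
  | (firstNum, lastNum, fIdx, lIdx) =>
    let idx := PySem.Chars.find l ns.1
    if idx = -1 then (firstNum, lastNum, fIdx, lIdx)
    else
      let p1 := if 0 ≤ idx ∧ idx ≤ fIdx then (([ns.2] : List Char), idx) else (firstNum, fIdx)
      let ridx := PySem.Chars.rfind l ns.1
      let p2 := if 0 ≤ ridx ∧ lIdx ≤ ridx then (([ns.2] : List Char), ridx) else (lastNum, lIdx)
      (p1.1, p2.1, p1.2, p2.2)

def finishA (st : List Char × List Char × Int × Int) : Int :=
  match st with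
  | (firstNum, lastNum, _, _) =>
    let numStr := if lastNum = ([] : List Char) ∧ firstNum ≠ ([] : List Char) then firstNum ++ firstNum
      else if lastNum ≠ ([] : List Char) ∧ firstNum ≠ ([] : List Char) then firstNum ++ lastNum
      else ['0']
    (PySem.Int.ofChars? numStr).getD 0

def phase1Res (l : List Char) : List Char × List Char × Int × Int × Int :=
  l.foldl stepA (([] : List Char), ([] : List Char), (l.length : Int) - 1, 0, 0)

def phase2Res (l : List Char) : List Char × List Char × Int × Int :=
  numsAsStrings.foldl (stepW l)
    ((phase1Res l).1, (phase1Res l).2.1, (phase1Res l).2.2.1, (phase1Res l).2.2.2.1)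

theorem calibrateLine_eq (line : String) :
    calibrateLine line = finishA (phase2Res line.toList) := rfl

theorem phase1 : ∀ (t : List Char) (k : Nat) (f la : List Char) (fi li : Int),
    (∀ c ∈ t, pvDomChar c = true) →
    t.foldl stepA (f, la, fi, li, (k : Int)) =
      ( (if f = [] then ((dpairs t k).head?.elim ([] : List Char) (fun p => [p.2])) else f)
      , ((dpairs t k).getLast?.elim la (fun p => [p.2]))
      , (if f = [] then ((dpairs t k).head?.elim fi (fun p => (p.1 : Int))) else fi)
      , ((dpairs t k).getLast?.elim li (fun p => (p.1 : Int)))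
      , ((k : Int) + t.length) ) := by
  intro t
  induction t with
  | nil =>
      intro k f la fi li _
      simp [dpairs]
  | cons c t ih =>
      intro k f la fi li hdom
      have domc : pvDomChar c = true := hdom c (List.mem_cons_self ..)
      have hdom' : ∀ x ∈ t, pvDomChar x = true := fun x hx => hdom x (List.mem_cons_of_mem _ hx)
      rw [List.foldl_cons]
      by_cases hd : isDigit19 c = true
      · -- a 1-9 digit
        have hint : ((c.toNat : Int) - 48) ≠ 0 := by
          unfold isDigit19 at hd
          simp only [Bool.and_eq_true, decide_eq_true_eq] at hd
          omega
        have hstep : ∀ cur : Int, stepA (f, la, fi, li, cur) c =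
            (if f = [] then ([c], [c], cur, cur, cur + 1) else (f, [c], fi, cur, cur + 1)) := by
          intro cur
          unfold stepA
          rw [ofChars_single c domc, hd]
          by_cases hf : f = []
          · simp [hf, hint]
          · simp [hf, hint]
        rw [hstep]
        have hds : dpairs (c :: t) k = (k, c) :: dpairs t (k + 1) := by simp [dpairs, hd]
        have hcast : ((k : Int) + 1) = ((k + 1 : Nat) : Int) := by push_cast; ring
        by_cases hf : f = []
        · rw [if_pos hf, hcast, ih (k + 1) [c] [c] (k : Int) (k : Int) hdom', hds]
          cases hrest : dpairs t (k + 1) with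
          | nil =>
              simp [hf]
              all_goals (push_cast; omega)
          | cons b r =>
              obtain ⟨p, hgl⟩ := Option.ne_none_iff_exists'.mp
                (by simp [List.getLast?_eq_none_iff] : ((b :: r).getLast? ≠ none))
              rw [List.getLast?_cons_cons, hgl]
              simp [hf]
              all_goals (push_cast; omega)
        · rw [if_neg hf, hcast, ih (k + 1) f [c] fi (k : Int) hdom', hds]
          cases hrest : dpairs t (k + 1) with
          | nil =>
              simp [hf]
              all_goals (push_cast; omega)
          | cons b r =>
              obtain ⟨p, hgl⟩ := Option.ne_none_iff_exists'.mp
                (by simp [List.getLast?_eq_none_iff] : ((b :: r).getLast? ≠ none))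
              rw [List.getLast?_cons_cons, hgl]
              simp [hf]
              all_goals (push_cast; omega)
      · -- '0' or not a digit at all: state unchanged, index advances
        have hstep : stepA (f, la, fi, li, (k : Int)) c = (f, la, fi, li, (k : Int) + 1) := by
          unfold stepA
          rw [ofChars_single c domc]
          simp only [hd, Bool.false_eq_true, if_false]
          by_cases h48 : c.toNat = 48
          · have hz : ((c.toNat : Int) - 48) = 0 := by omega
            simp [h48, hz]
          · simp [h48]
        rw [hstep]
        have hds : dpairs (c :: t) k = dpairs t (k + 1) := by
          simp [dpairs, hd]
        have : ((k : Int) + 1) = ((k + 1 : Nat) : Int) := by push_cast; ring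
        rw [this, ih (k + 1) f la fi li hdom', hds]
        simp
        all_goals (push_cast; omega)

-- phase 2: pools of (index, value) contributions and the selection invariants
def contribF (l : List Char) (w : List Char × Char) : List (Int × Char) :=
  if PySem.Chars.find l w.1 = -1 then [] else [(PySem.Chars.find l w.1, w.2)]

def contribL (l : List Char) (w : List Char × Char) : List (Int × Char) :=
  if PySem.Chars.find l w.1 = -1 then [] else [(PySem.Chars.rfind l w.1, w.2)]

def InvF (n : Nat) (f : List Char) (fi : Int) (P : List (Int × Char)) : Prop :=
  (P = [] ∧ f = [] ∧ fi = (n : Int) - 1) ∨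
  (∃ p ∈ P, f = [p.2] ∧ fi = p.1 ∧ ∀ q ∈ P, p.1 ≤ q.1)

def InvL (la : List Char) (li : Int) (P : List (Int × Char)) : Prop :=
  (P = [] ∧ la = [] ∧ li = 0) ∨
  (∃ p ∈ P, la = [p.2] ∧ li = p.1 ∧ ∀ q ∈ P, q.1 ≤ p.1)

theorem step2 (l : List Char) (w : List Char × Char) (hw : w ∈ numsAsStrings)
    {f la : List Char} {fi li : Int} {PF PL : List (Int × Char)}
    (hF : InvF l.length f fi PF) (hL : InvL la li PL) :
    InvF l.length (stepW l (f, la, fi, li) w).1 (stepW l (f, la, fi, li) w).2.2.1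
      (PF ++ contribF l w) ∧
    InvL (stepW l (f, la, fi, li) w).2.1 (stepW l (f, la, fi, li) w).2.2.2
      (PL ++ contribL l w) := by
  by_cases hfind : PySem.Chars.find l w.1 = -1
  · unfold stepW contribF contribL
    simp only [hfind, if_true, if_pos]
    simpa using ⟨hF, hL⟩
  · obtain ⟨h0, hp, hmin⟩ := find_found hfind
    have hwne : w.1 ≠ [] := words_ne_nil w hw
    have hlen3 : 3 ≤ w.1.length := words_len3 w hw
    have hbound : (PySem.Chars.find l w.1).toNat + w.1.length ≤ l.length := by
      have := hp.length_le
      rw [List.length_drop] at this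
      omega
    obtain ⟨m, hrm, hpm, hmmax⟩ := rfind_found hwne hp
    have hr0 : 0 ≤ PySem.Chars.rfind l w.1 := by rw [hrm]; exact Int.natCast_nonneg m
    unfold stepW contribF contribL
    simp only [hfind, if_false, if_neg]
    constructor
    · -- first component
      rcases hF with ⟨hPF, hf, hfi⟩ | ⟨p, hpP, hf, hfi, hminP⟩
      · -- empty pool: the update fires (find ≤ n - 3 < n - 1)
        have hcond : 0 ≤ PySem.Chars.find l w.1 ∧ PySem.Chars.find l w.1 ≤ fi := by
          refine ⟨h0, ?_⟩
          rw [hfi]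
          omega
        simp only [if_pos hcond, hPF, List.nil_append]
        right
        exact ⟨(PySem.Chars.find l w.1, w.2), by simp, rfl, rfl, by simp⟩
      · by_cases hcond : 0 ≤ PySem.Chars.find l w.1 ∧ PySem.Chars.find l w.1 ≤ fi
        · simp only [if_pos hcond]
          right
          refine ⟨(PySem.Chars.find l w.1, w.2), by simp, rfl, rfl, ?_⟩
          intro q hq
          rcases List.mem_append.mp hq with hq | hq
          · exact le_trans (le_trans hcond.2 (le_of_eq hfi)) (hminP q hq)
          · rw [List.mem_singleton.mp hq]
        · simp only [if_neg hcond]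
          right
          refine ⟨p, List.mem_append_left _ hpP, hf, hfi, ?_⟩
          intro q hq
          rcases List.mem_append.mp hq with hq | hq
          · exact hminP q hq
          · rw [List.mem_singleton.mp hq]
            simp only []
            rw [hfi] at hcond
            push_neg at hcond
            exact le_of_lt (hcond h0)
    · -- last component
      rcases hL with ⟨hPL, hla, hli⟩ | ⟨p, hpP, hla, hli, hmaxP⟩
      · have hcond : 0 ≤ PySem.Chars.rfind l w.1 ∧ li ≤ PySem.Chars.rfind l w.1 := by
          rw [hli]; exact ⟨hr0, hr0⟩
        simp only [if_pos hcond, hPL, List.nil_append]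
        right
        exact ⟨(PySem.Chars.rfind l w.1, w.2), by simp, rfl, rfl, by simp⟩
      · by_cases hcond : 0 ≤ PySem.Chars.rfind l w.1 ∧ li ≤ PySem.Chars.rfind l w.1
        · simp only [if_pos hcond]
          right
          refine ⟨(PySem.Chars.rfind l w.1, w.2), by simp, rfl, rfl, ?_⟩
          intro q hq
          rcases List.mem_append.mp hq with hq | hq
          · exact le_trans (hmaxP q hq) (le_trans (le_of_eq hli.symm) hcond.2)
          · rw [List.mem_singleton.mp hq]
        · simp only [if_neg hcond]
          right
          refine ⟨p, List.mem_append_left _ hpP, hla, hli, ?_⟩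
          intro q hq
          rcases List.mem_append.mp hq with hq | hq
          · exact hmaxP q hq
          · rw [List.mem_singleton.mp hq]
            simp only []
            rw [hli] at hcond
            push_neg at hcond
            exact le_of_lt (hcond hr0)

theorem fold2 (l : List Char) : ∀ (ws : List (List Char × Char)), (∀ w ∈ ws, w ∈ numsAsStrings) →
    ∀ (f la : List Char) (fi li : Int) (PF PL : List (Int × Char)),
    InvF l.length f fi PF → InvL la li PL →
    InvF l.length (ws.foldl (stepW l) (f, la, fi, li)).1
      (ws.foldl (stepW l) (f, la, fi, li)).2.2.1 (PF ++ ws.flatMap (contribF l)) ∧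
    InvL (ws.foldl (stepW l) (f, la, fi, li)).2.1
      (ws.foldl (stepW l) (f, la, fi, li)).2.2.2 (PL ++ ws.flatMap (contribL l)) := by
  intro ws
  induction ws with
  | nil =>
      intro _ f la fi li PF PL hF hL
      simpa using ⟨hF, hL⟩
  | cons w ws ih =>
      intro hmem f la fi li PF PL hF hL
      have hw : w ∈ numsAsStrings := hmem w (List.mem_cons_self ..)
      obtain ⟨hF', hL'⟩ := step2 l w hw hF hL
      rw [List.foldl_cons]
      have heq : stepW l (f, la, fi, li) w =
          ((stepW l (f, la, fi, li) w).1, (stepW l (f, la, fi, li) w).2.1,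
           (stepW l (f, la, fi, li) w).2.2.1, (stepW l (f, la, fi, li) w).2.2.2) := rfl
      rw [heq]
      have := ih (fun x hx => hmem x (List.mem_cons_of_mem _ hx)) _ _ _ _ _ _ hF' hL'
      simpa [List.flatMap_cons, List.append_assoc] using this

-- B's loop body, named, and its candidate-list characterization
def stepB (l : List Char) (acc : List Char) (p : Int × Char) : List Char :=
  if p.2 ∈ ['1','2','3','4','5','6','7','8','9'] then acc ++ [p.2]
  else
    match numsAsStrings.find? (fun w => w.1.isPrefixOf (l.drop p.1.toNat)) with
    | some w => acc ++ [w.2]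
    | none => acc

def candsRes (l : List Char) : List Char := (PySem.List.enumerate l).foldl (stepB l) []

theorem calibrateLine_alt_eq (line : String) :
    calibrateLine_alt line =
      (match candsRes line.toList with
       | [] => 0
       | c :: rest => (PySem.Int.ofChars? [c, (c :: rest).getLast (by simp)]).getD 0) := rfl

def gB (l : List Char) (p : Int × Char) : List Char :=
  if p.2 ∈ ['1','2','3','4','5','6','7','8','9'] then [p.2]
  else
    match numsAsStrings.find? (fun w => w.1.isPrefixOf (l.drop p.1.toNat)) with
    | some w => [w.2]
    | none => []

theorem stepB_eq (l : List Char) (acc : List Char) (p : Int × Char) :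
    stepB l acc p = acc ++ gB l p := by
  unfold stepB gB
  split
  · rfl
  · cases numsAsStrings.find? (fun w => w.1.isPrefixOf (l.drop p.1.toNat)) with
    | none => simp
    | some w => rfl

theorem enum_flat (l : List Char) (hdom : ∀ c ∈ l, pvDomChar c = true) :
    ∀ (t : List Char) (k : Nat), t = l.drop k →
    (PySem.List.enumerate t (k : Int)).flatMap (gB l) =
      (List.range' k t.length).filterMap (fun i => candAt l i) := by
  intro t
  induction t with
  | nil => intro k _; simp [PySem.List.enumerate]
  | cons c t ih =>
      intro k hk
      have hget : l[k]? = some c := by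
        rw [← List.head?_drop, ← hk]; simp
      have hdomc : pvDomChar c = true := hdom c (List.mem_of_getElem? hget)
      have ht : t = l.drop (k + 1) := by
        have h2 : l.drop (k + 1) = (l.drop k).tail := by
          rw [← List.drop_drop]; simp
        rw [h2, ← hk]
        rfl
      rw [PySem.List.enumerate_cons]
      have hcast : ((k : Int) + 1) = ((k + 1 : Nat) : Int) := by push_cast; ring
      rw [List.flatMap_cons, hcast, ih (k + 1) ht]
      have hlen : (c :: t).length = t.length + 1 := by simp
      rw [hlen, List.range'_succ, List.filterMap_cons]
      have hgb : gB l ((k : Int), c) = (candAt l k).toList := by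
        unfold gB
        rw [candAt_of_getElem hget]
        simp only [Int.toNat_natCast]
        by_cases hd : isDigit19 c = true
        · rw [if_pos ((mem_digits_iff c hdomc).mpr hd), if_pos hd]
          rfl
        · rw [if_neg (fun hmem => hd ((mem_digits_iff c hdomc).mp hmem)), if_neg hd]
          unfold wordAt
          cases numsAsStrings.find? (fun w => w.1.isPrefixOf (l.drop k)) with
          | none => rfl
          | some w => rfl
      rw [hgb]
      cases hca : candAt l k with
      | none => simp
      | some v => simp

theorem candsB_eq (line : String) (hdom : ∀ c ∈ line.toList, pvDomChar c = true) :
    candsRes line.toList = (candPairs line.toList).map (fun p => p.2) := by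
  unfold candsRes
  have h1 : (PySem.List.enumerate line.toList).foldl (stepB line.toList) [] =
      (PySem.List.enumerate line.toList).foldl
        (fun acc x => acc ++ gB line.toList x) [] := by
    exact PySem.List.foldl_congr_mem _ _ _ _ (fun acc x _ => stepB_eq line.toList acc x)
  rw [h1, PySem.List.foldl_append_eq_flatMap, List.nil_append]
  have h2 := enum_flat line.toList hdom line.toList 0 (by simp)
  rw [show ((0 : Nat) : Int) = 0 from rfl] at h2
  rw [h2]
  unfold candPairs
  rw [List.map_filterMap, List.range_eq_range']
  congr 1
  funext i
  rw [Option.map_map]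
  cases candAt line.toList i <;> rfl


-- pools after the full word loop, and their correspondence with candidates
def P0F (l : List Char) : List (Int × Char) :=
  (dpairs l 0).head?.elim [] (fun q => [((q.1 : Int), q.2)])

def P0L (l : List Char) : List (Int × Char) :=
  (dpairs l 0).getLast?.elim [] (fun q => [((q.1 : Int), q.2)])

def poolF (l : List Char) : List (Int × Char) := P0F l ++ numsAsStrings.flatMap (contribF l)
def poolL (l : List Char) : List (Int × Char) := P0L l ++ numsAsStrings.flatMap (contribL l)

theorem dmem_cand {l : List Char} {q : Nat × Char} (hq : q ∈ dpairs l 0) :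
    candAt l q.1 = some q.2 := by
  obtain ⟨-, hget, hdig⟩ := (mem_dpairs l 0 q.1 q.2).mp hq
  simp only [Nat.sub_zero] at hget
  rw [candAt_of_getElem hget, if_pos hdig]

theorem wmem_cand {l : List Char} {w : List Char × Char} {i : Nat}
    (hw : w ∈ numsAsStrings) (hp : w.1 <+: l.drop i) : candAt l i = some w.2 := by
  obtain ⟨hc, wrest, hw1⟩ := List.exists_cons_of_ne_nil (words_ne_nil w hw)
  have hget : l[i]? = some hc := by
    rw [← List.head?_drop]
    obtain ⟨t, ht⟩ := hp
    rw [← ht, hw1]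
    simp
  have hdig : isDigit19 hc = false := by
    have := words_head_not_digit w hw
    rwa [hw1, List.headD_cons] at this
  rw [candAt_of_getElem hget, if_neg (by simp [hdig]), wordAt_of_prefix hw hp]

theorem pool_mem_cand_F (l : List Char) :
    ∀ p ∈ poolF l, ∃ np : Nat, p.1 = (np : Int) ∧ candAt l np = some p.2 := by
  intro p hp
  rcases List.mem_append.mp hp with hp | hp
  · unfold P0F at hp
    cases hh : (dpairs l 0).head? with
    | none => rw [hh] at hp; simp at hp
    | some q =>
        rw [hh] at hp
        simp only [Option.elim_some, List.mem_singleton] at hp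
        subst hp
        exact ⟨q.1, rfl, dmem_cand (List.mem_of_mem_head? (by rw [hh]; simp))⟩
  · obtain ⟨w, hw, hpw⟩ := List.mem_flatMap.mp hp
    unfold contribF at hpw
    by_cases hfind : PySem.Chars.find l w.1 = -1
    · rw [if_pos hfind] at hpw; simp at hpw
    · rw [if_neg hfind] at hpw
      rw [List.mem_singleton.mp hpw]
      obtain ⟨h0, hpre, -⟩ := find_found hfind
      exact ⟨(PySem.Chars.find l w.1).toNat, (Int.toNat_of_nonneg h0).symm,
        wmem_cand hw hpre⟩

theorem pool_mem_cand_L (l : List Char) :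
    ∀ p ∈ poolL l, ∃ np : Nat, p.1 = (np : Int) ∧ candAt l np = some p.2 := by
  intro p hp
  rcases List.mem_append.mp hp with hp | hp
  · unfold P0L at hp
    cases hh : (dpairs l 0).getLast? with
    | none => rw [hh] at hp; simp at hp
    | some q =>
        rw [hh] at hp
        simp only [Option.elim_some, List.mem_singleton] at hp
        subst hp
        exact ⟨q.1, rfl, dmem_cand (List.mem_of_getLast? hh)⟩
  · obtain ⟨w, hw, hpw⟩ := List.mem_flatMap.mp hp
    unfold contribL at hpw
    by_cases hfind : PySem.Chars.find l w.1 = -1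
    · rw [if_pos hfind] at hpw; simp at hpw
    · rw [if_neg hfind] at hpw
      rw [List.mem_singleton.mp hpw]
      obtain ⟨-, hpre, -⟩ := find_found hfind
      obtain ⟨m, hrm, hpm, -⟩ := rfind_found (words_ne_nil w hw) hpre
      exact ⟨m, hrm, wmem_cand hw hpm⟩

theorem cand_pool_F (l : List Char) {i : Nat} {v : Char} (hc : candAt l i = some v) :
    ∃ q ∈ poolF l, q.1 ≤ (i : Int) := by
  cases hget : l[i]? with
  | none => unfold candAt at hc; rw [hget] at hc; exact absurd hc (by simp)
  | some c =>
      rw [candAt_of_getElem hget] at hc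
      by_cases hdig : isDigit19 c = true
      · rw [if_pos hdig] at hc
        have hmem : (i, c) ∈ dpairs l 0 :=
          (mem_dpairs l 0 i c).mpr ⟨Nat.zero_le _, by simpa using hget, hdig⟩
        cases hh : (dpairs l 0).head? with
        | none => rw [List.head?_eq_none_iff.mp hh] at hmem; simp at hmem
        | some q0 =>
            refine ⟨((q0.1 : Int), q0.2), List.mem_append_left _ ?_, ?_⟩
            · unfold P0F; rw [hh]; simp
            · obtain ⟨t, ht⟩ := List.head?_eq_some_iff.mp hh
              have := sorted_head_min (ht ▸ dpairs_sorted l 0) (i, c) (ht ▸ hmem)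
              simpa using this
      · rw [if_neg hdig] at hc
        obtain ⟨w, hw, -, hpre⟩ := wordAt_eq_some hc
        have hfind : PySem.Chars.find l w.1 ≠ -1 := find_ne_of_prefix hpre
        obtain ⟨h0, -, hmin⟩ := find_found hfind
        refine ⟨(PySem.Chars.find l w.1, w.2), List.mem_append_right _ ?_, ?_⟩
        · exact List.mem_flatMap.mpr ⟨w, hw, by simp [contribF, hfind]⟩
        · have := hmin i hpre
          omega

theorem cand_pool_L (l : List Char) {i : Nat} {v : Char} (hc : candAt l i = some v) :
    ∃ q ∈ poolL l, (i : Int) ≤ q.1 := by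
  cases hget : l[i]? with
  | none => unfold candAt at hc; rw [hget] at hc; exact absurd hc (by simp)
  | some c =>
      rw [candAt_of_getElem hget] at hc
      by_cases hdig : isDigit19 c = true
      · rw [if_pos hdig] at hc
        have hmem : (i, c) ∈ dpairs l 0 :=
          (mem_dpairs l 0 i c).mpr ⟨Nat.zero_le _, by simpa using hget, hdig⟩
        have hne : dpairs l 0 ≠ [] := by intro h; rw [h] at hmem; simp at hmem
        obtain ⟨q0, hh⟩ := Option.ne_none_iff_exists'.mp
          (fun h => hne (List.getLast?_eq_none_iff.mp h))
        refine ⟨((q0.1 : Int), q0.2), List.mem_append_left _ ?_, ?_⟩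
        · unfold P0L; rw [hh]; simp
        · have hq0 : (dpairs l 0).getLast hne = q0 := by
            have := List.getLast?_eq_some_getLast (hne : dpairs l 0 ≠ [])
            rw [hh] at this
            exact (Option.some_inj.mp this).symm
          have := sorted_getLast_max (dpairs_sorted l 0) hne (i, c) hmem
          rw [hq0] at this
          simpa using this
      · rw [if_neg hdig] at hc
        obtain ⟨w, hw, -, hpre⟩ := wordAt_eq_some hc
        have hfind : PySem.Chars.find l w.1 ≠ -1 := find_ne_of_prefix hpre
        obtain ⟨m, hrm, -, hmax⟩ := rfind_found (words_ne_nil w hw) hpre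
        refine ⟨(PySem.Chars.rfind l w.1, w.2), List.mem_append_right _ ?_, ?_⟩
        · exact List.mem_flatMap.mpr ⟨w, hw, by simp [contribL, hfind]⟩
        · have := hmax i hpre
          omega

theorem first_val (l : List Char) {f : List Char} {fi : Int}
    (hinv : InvF l.length f fi (poolF l))
    {i0 : Nat} {v0 : Char} {rest : List (Nat × Char)}
    (hcp : candPairs l = (i0, v0) :: rest) : f = [v0] := by
  have hc0 : candAt l i0 = some v0 :=
    mem_candPairs.mp (by rw [hcp]; exact List.mem_cons_self ..)
  obtain ⟨q, hqP, hqle⟩ := cand_pool_F l hc0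
  rcases hinv with ⟨hP, -, -⟩ | ⟨p, hpP, hf, -, hmin⟩
  · rw [hP] at hqP; simp at hqP
  · obtain ⟨np, hnp, hcnp⟩ := pool_mem_cand_F l p hpP
    have hmemcp : (np, p.2) ∈ candPairs l := mem_candPairs.mpr hcnp
    have h1 : i0 ≤ np := by
      have := sorted_head_min (hcp ▸ candPairs_sorted l) (np, p.2) (hcp ▸ hmemcp)
      simpa using this
    have h2 : p.1 ≤ (i0 : Int) := le_trans (hmin q hqP) hqle
    have heq : np = i0 := by omega
    rw [heq] at hcnp
    rw [hcnp] at hc0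
    rw [hf, Option.some_inj.mp hc0]

theorem last_val (l : List Char) {la : List Char} {li : Int}
    (hinv : InvL la li (poolL l))
    (hne : candPairs l ≠ []) : la = [((candPairs l).getLast hne).2] := by
  have hmemL : (candPairs l).getLast hne ∈ candPairs l := List.getLast_mem hne
  have hcL : candAt l ((candPairs l).getLast hne).1 = some ((candPairs l).getLast hne).2 := by
    exact mem_candPairs.mp (by simpa using hmemL)
  obtain ⟨q, hqP, hqle⟩ := cand_pool_L l hcL
  rcases hinv with ⟨hP, -, -⟩ | ⟨p, hpP, hla, -, hmax⟩
  · rw [hP] at hqP; simp at hqP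
  · obtain ⟨np, hnp, hcnp⟩ := pool_mem_cand_L l p hpP
    have hmemcp : (np, p.2) ∈ candPairs l := mem_candPairs.mpr hcnp
    have h1 : np ≤ ((candPairs l).getLast hne).1 :=
      sorted_getLast_max (candPairs_sorted l) hne (np, p.2) hmemcp
    have h2 : ((candPairs l).getLast hne).1 ≤ p.1 := le_trans hqle (hmax q hqP)
    have heq : np = ((candPairs l).getLast hne).1 := by omega
    rw [heq] at hcnp
    rw [hcnp] at hcL
    rw [hla, Option.some_inj.mp hcL]

theorem getLast_map_snd : ∀ (cp : List (Nat × Char)) (h : cp ≠ [])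
    (h2 : cp.map (fun p => p.2) ≠ []),
    (cp.map (fun p => p.2)).getLast h2 = (cp.getLast h).2 := by
  intro cp h h2
  rw [List.getLast_eq_iff_getLast?_eq_some, List.getLast?_map,
    List.getLast?_eq_some_getLast (h : cp ≠ [])]
  rfl

-- ===== VERDICT (by name: the statement is the Claim_ definition above) =====
theorem calibrateLine_spec : Claim_equal_calibrateLine := by
  intro line hdom
  have hdoml : ∀ c ∈ line.toList, pvDomChar c = true := by
    have h : pvDomStr line = true := hdom
    unfold pvDomStr at h
    simpa [List.all_eq_true] using h
  unfold Spec_calibrateLine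
  rw [calibrateLine_eq, calibrateLine_alt_eq, candsB_eq line hdoml]
  set l := line.toList with hlds
  -- phase 1: the digit loop
  have hP : phase1Res l =
      ( (dpairs l 0).head?.elim ([] : List Char) (fun p => [p.2])
      , (dpairs l 0).getLast?.elim ([] : List Char) (fun p => [p.2])
      , (dpairs l 0).head?.elim ((l.length : Int) - 1) (fun p => (p.1 : Int))
      , (dpairs l 0).getLast?.elim (0 : Int) (fun p => (p.1 : Int))
      , ((0 : Nat) : Int) + l.length ) := by
    show l.foldl stepA ([], [], (l.length : Int) - 1, 0, ((0 : Nat) : Int)) = _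
    rw [phase1 l 0 [] [] ((l.length : Int) - 1) 0 hdoml]
    simp
  have hInvF0 : InvF l.length ((dpairs l 0).head?.elim ([] : List Char) (fun p => [p.2]))
      ((dpairs l 0).head?.elim ((l.length : Int) - 1) (fun p => (p.1 : Int))) (P0F l) := by
    unfold InvF P0F
    cases hh : (dpairs l 0).head? with
    | none => left; simp
    | some q => right; exact ⟨((q.1 : Int), q.2), by simp, by simp, by simp, by simp⟩
  have hInvL0 : InvL ((dpairs l 0).getLast?.elim ([] : List Char) (fun p => [p.2]))
      ((dpairs l 0).getLast?.elim (0 : Int) (fun p => (p.1 : Int))) (P0L l) := by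
    unfold InvL P0L
    cases hh : (dpairs l 0).getLast? with
    | none => left; simp
    | some q => right; exact ⟨((q.1 : Int), q.2), by simp, by simp, by simp, by simp⟩
  obtain ⟨hIF, hIL⟩ := fold2 l numsAsStrings (fun _ hw => hw)
    ((dpairs l 0).head?.elim ([] : List Char) (fun p => [p.2]))
    ((dpairs l 0).getLast?.elim ([] : List Char) (fun p => [p.2]))
    ((dpairs l 0).head?.elim ((l.length : Int) - 1) (fun p => (p.1 : Int)))
    ((dpairs l 0).getLast?.elim (0 : Int) (fun p => (p.1 : Int)))
    (P0F l) (P0L l) hInvF0 hInvL0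
  have hP2 : phase2Res l = numsAsStrings.foldl (stepW l)
      ( (dpairs l 0).head?.elim ([] : List Char) (fun p => [p.2])
      , (dpairs l 0).getLast?.elim ([] : List Char) (fun p => [p.2])
      , (dpairs l 0).head?.elim ((l.length : Int) - 1) (fun p => (p.1 : Int))
      , (dpairs l 0).getLast?.elim (0 : Int) (fun p => (p.1 : Int)) ) := by
    unfold phase2Res
    rw [hP]
  rw [← hP2] at hIF hIL
  have hpoolF : P0F l ++ numsAsStrings.flatMap (contribF l) = poolF l := rfl
  have hpoolL : P0L l ++ numsAsStrings.flatMap (contribL l) = poolL l := rfl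
  rw [hpoolF] at hIF
  rw [hpoolL] at hIL
  have heta : phase2Res l =
      ((phase2Res l).1, (phase2Res l).2.1, (phase2Res l).2.2.1, (phase2Res l).2.2.2) := rfl
  cases hcp : candPairs l with
  | nil =>
      have hf : (phase2Res l).1 = [] := by
        rcases hIF with ⟨-, hf, -⟩ | ⟨p, hpP, -, -, -⟩
        · exact hf
        · obtain ⟨np, -, hcnp⟩ := pool_mem_cand_F l p hpP
          have : (np, p.2) ∈ candPairs l := mem_candPairs.mpr hcnp
          rw [hcp] at this
          simp at this
      have hla : (phase2Res l).2.1 = [] := by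
        rcases hIL with ⟨-, hla, -⟩ | ⟨p, hpP, -, -, -⟩
        · exact hla
        · obtain ⟨np, -, hcnp⟩ := pool_mem_cand_L l p hpP
          have : (np, p.2) ∈ candPairs l := mem_candPairs.mpr hcnp
          rw [hcp] at this
          simp at this
      show finishA (phase2Res l) = 0
      rw [heta, hf, hla]
      show (PySem.Int.ofChars? ['0']).getD 0 = 0
      decide
  | cons hd rest =>
      have hneC : candPairs l ≠ [] := by rw [hcp]; simp
      have hcp' : candPairs l = (hd.1, hd.2) :: rest := by rw [hcp]
      have hf : (phase2Res l).1 = [hd.2] := first_val l hIF hcp'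
      have hla : (phase2Res l).2.1 = [((candPairs l).getLast hneC).2] := last_val l hIL hneC
      have hgl : (hd.2 :: rest.map (fun p => p.2)).getLast (by simp) =
          ((candPairs l).getLast hneC).2 := by
        have hcongr : ∀ (xs ys : List Char) (hx : xs ≠ []) (hy : ys ≠ []), xs = ys →
            xs.getLast hx = ys.getLast hy := by
          intro xs ys hx hy he; subst he; rfl
        rw [hcongr _ ((candPairs l).map (fun p => p.2)) (by simp) (by simp [hcp])
            (by rw [hcp]; rfl),
          getLast_map_snd (candPairs l) hneC]
      show finishA (phase2Res l) =
        (PySem.Int.ofChars? [hd.2, (hd.2 :: rest.map (fun p => p.2)).getLast (by simp)]).getD 0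
      rw [hgl, heta, hf, hla]
      unfold finishA
      simp
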